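-- pv_equiv track=rewrite | github.com/MarianDanaila/Competitive-Programming | LeetCode_30days_challenge/2021/January/Get Maximum in Generated Array.py | getMaximumGenerated
-- ===== SOURCE A (Python) =====
-- def getMaximumGenerated(n):
--     if n == 0:
--         return 0
--     nums = [0] * (n + 1)
--     nums[1] = 1
--     maximum = 1
--     for i in range(1, n // 2 + 1):
--         nums[2 * i] = nums[i]
--         if i == n // 2 and n % 2 == 0:
--             break
--         nums[2 * i + 1] = nums[i] + nums[i + 1]
--         maximum = max(maximum, nums[i] + nums[i + 1])
--     return maximum
-- ===== SOURCE B (Python) =====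
-- def getMaximumGenerated(n):
--     memo = {}
--
--     def f(j):
--         if j < 2:
--             return j
--         if j not in memo:
--             memo[j] = f(j // 2) if j % 2 == 0 else f(j // 2) + f(j // 2 + 1)
--         return memo[j]
--
--     return max(f(j) for j in range(n + 1))
-- ===== Notes on version B (the rewrite author's own statement) =====
-- stated objective: alternative
-- what changed: Replaces A's bottom-up array fill (push loop writing nums[2i], nums[2i+1] with an even-n break and a running maximum) by top-down memoized recursion: no array at all, a nested recursive function f(j) computing the recurrence value from its parent with a dict memo, and max taken over f(j) for j in range(n+1).
import Mathlib
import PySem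

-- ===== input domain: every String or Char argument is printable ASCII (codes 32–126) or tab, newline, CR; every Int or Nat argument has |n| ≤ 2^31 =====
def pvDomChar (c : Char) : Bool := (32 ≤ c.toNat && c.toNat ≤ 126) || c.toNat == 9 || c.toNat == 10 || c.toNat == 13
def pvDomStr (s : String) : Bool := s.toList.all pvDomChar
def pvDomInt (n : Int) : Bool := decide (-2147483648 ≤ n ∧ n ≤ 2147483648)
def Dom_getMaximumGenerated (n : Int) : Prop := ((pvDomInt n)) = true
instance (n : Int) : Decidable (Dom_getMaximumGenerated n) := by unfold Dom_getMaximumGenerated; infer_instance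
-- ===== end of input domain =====

-- B replaces A's bottom-up array push loop (even-n break, running maximum) by top-down
-- memoized recursion with a dict plus a max over range(n+1): a different decomposition, not faster.


-- ===== PORT A =====
-- The loop `for i in range(1, n//2+1)` with its break, as counter recursion on i.
-- Under Pre_ (0 ≤ n) every Python index is a nonnegative in-range index, so
-- nums[i] reads/writes are exactly List.getD / List.set here.
def pvALoop (H : Nat) (ev : Bool) (i : Nat) (nums : List Int) (maximum : Int) : Int :=
  if h : H + 1 ≤ i then maximum
  else
    let nums1 := nums.set (2*i) (nums.getD i 0)     -- nums[2*i] = nums[i]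
    if i = H ∧ ev = true then maximum               -- if i == n//2 and n % 2 == 0: break
    else
      let v := nums1.getD i 0 + nums1.getD (i+1) 0  -- nums[i] + nums[i+1]
      pvALoop H ev (i+1) (nums1.set (2*i+1) v) (max maximum v)
termination_by H + 1 - i
decreasing_by omega

def getMaximumGenerated (n : Int) : Int :=
  if n = 0 then 0
  else
    let nums := (List.replicate (n+1).toNat (0:Int)).set 1 1   -- nums = [0]*(n+1); nums[1] = 1
    pvALoop (PySem.Int.floordiv n 2).toNat (PySem.Int.mod n 2 == 0) 1 nums 1

-- ===== PORT B =====
-- The nested function f of Source B, step for step; Python's mutable memo dict (an internal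
-- helper value, O(1) lookup) is a Std.HashMap threaded explicitly, so f returns
-- (value, updated memo), and `return memo[j]` after the insert is the final getD.
-- The fuel argument is only a structural totality guard: every recursive call strictly
-- decreases j, so fuel j.toNat+1 at each call site is never exhausted.
def pvBF : Nat → Int → Std.HashMap Int Int → Int × Std.HashMap Int Int
  | 0, _, memo => (0, memo)                              -- unreachable: fuel > depth
  | fuel+1, j, memo =>
    if j < 2 then (j, memo)                              -- if j < 2: return j
    else if memo.contains j then (memo.getD j 0, memo)   -- j in memo: return memo[j]
    else if PySem.Int.mod j 2 == 0 then
      let r := pvBF fuel (PySem.Int.floordiv j 2) memo   -- f(j // 2)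
      let m := r.2.insert j r.1                          -- memo[j] = …
      (m.getD j 0, m)                                    -- return memo[j]
    else
      let r1 := pvBF fuel (PySem.Int.floordiv j 2) memo  -- f(j // 2)
      let r2 := pvBF fuel (PySem.Int.floordiv j 2 + 1) r1.2   -- f(j // 2 + 1)
      let m := r2.2.insert j (r1.1 + r2.1)               -- memo[j] = …
      (m.getD j 0, m)                                    -- return memo[j]

-- max(f(j) for j in range(n+1)): Python's max consumes the generator keeping a running
-- maximum (no list is built), and the generator shares the closure's memo, so the fold
-- threads the memo next to the running maximum; max of an empty generator is a
-- ValueError (n < 0, outside Pre_), where the .getD 0 is never taken.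
def getMaximumGenerated_alt (n : Int) : Int :=
  let res := (PySem.List.pyRange 0 (n+1) 1).foldl
      (fun acc j =>
        let r := pvBF (j.toNat + 1) j acc.1
        (r.2, some (match acc.2 with | none => r.1 | some m => max m r.1)))
      ((∅ : Std.HashMap Int Int), (none : Option Int))
  res.2.getD 0

-- ===== PRECONDITION & SPEC =====
-- A raises IndexError for every n < 0 (nums[1] = 1 on a too-short list); B raises
-- ValueError there (max of an empty generator), so exactly 0 ≤ n is admitted.
def Pre_getMaximumGenerated (n : Int) : Prop := 0 ≤ n
instance (n : Int) : Decidable (Pre_getMaximumGenerated n) := by unfold Pre_getMaximumGenerated; infer_instance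
def pvWitness_getMaximumGenerated : Int := 7

def Spec_getMaximumGenerated (n : Int) (out : Int) : Prop := out = getMaximumGenerated_alt n
instance (n : Int) (out : Int) : Decidable (Spec_getMaximumGenerated n out) := by unfold Spec_getMaximumGenerated; infer_instance

-- ===== CLAIM (what is proved, stated in full; the proofs are below) =====
def Claim_equal_getMaximumGenerated : Prop := ∀ (n : Int), Dom_getMaximumGenerated n → Pre_getMaximumGenerated n → Spec_getMaximumGenerated n (getMaximumGenerated n)

-- ===== LEMMAS AND PROOFS =====

-- the generated-array recurrence, used as the common specification of both ports
def pvGen (j : Nat) : Int :=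
  if _h0 : j = 0 then 0
  else if _h1 : j = 1 then 1
  else if _h2 : j % 2 = 0 then pvGen (j / 2)
  else pvGen (j / 2) + pvGen (j / 2 + 1)
termination_by j
decreasing_by all_goals omega

lemma pvGen_zero : pvGen 0 = 0 := by rw [pvGen]; simp

lemma pvGen_one : pvGen 1 = 1 := by rw [pvGen]; simp

lemma pvGen_even (k : Nat) (hk : 1 ≤ k) : pvGen (2*k) = pvGen k := by
  rw [pvGen]
  rw [dif_neg (by omega : ¬ 2*k = 0), dif_neg (by omega : ¬ 2*k = 1),
      dif_pos (by omega : 2*k % 2 = 0), (by omega : 2*k/2 = k)]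

lemma pvGen_odd (k : Nat) (hk : 1 ≤ k) : pvGen (2*k+1) = pvGen k + pvGen (k+1) := by
  rw [pvGen]
  rw [dif_neg (by omega : ¬ 2*k+1 = 0), dif_neg (by omega : ¬ 2*k+1 = 1),
      dif_neg (by omega : ¬ (2*k+1) % 2 = 0), (by omega : (2*k+1)/2 = k)]

-- gmax N = max of pvGen over 0..N
def gmax : Nat → Int
  | 0 => 0
  | k+1 => max (gmax k) (pvGen (k+1))

-- M k = A's running maximum after the iterations i = 1 .. k-1 have completed
def M : Nat → Int
  | 0 => 1
  | 1 => 1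
  | k+2 => max (M (k+1)) (pvGen (2*k+3))

lemma M_succ (k : Nat) (hk : 1 ≤ k) : M (k+1) = max (M k) (pvGen (2*k+1)) := by
  obtain ⟨j, rfl⟩ : ∃ j, k = j + 1 := ⟨k - 1, by omega⟩
  show M (j+2) = _
  rw [M]
  ring_nf

lemma one_le_M (k : Nat) : 1 ≤ M k := by
  induction k with
  | zero => simp [M]
  | succ k ih =>
    match k, ih with
    | 0, _ => simp [M]
    | k+1, ih => rw [M]; exact le_max_of_le_left ih

lemma M_le_M_succ (k : Nat) : M k ≤ M (k+1) := by
  match k with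
  | 0 => simp [M]
  | k+1 => rw [M]; exact le_max_left _ _

lemma pvGen_odd_le_M (i k : Nat) (h1 : 1 ≤ i) (h2 : i < k) : pvGen (2*i+1) ≤ M k := by
  induction k with
  | zero => omega
  | succ k ih =>
    rcases Nat.lt_succ_iff_lt_or_eq.mp h2 with h | rfl
    · exact le_trans (ih h) (M_le_M_succ k)
    · rw [M_succ i h1]; exact le_max_right _ _

lemma pvGen_le_M (j k : Nat) (_hk : 1 ≤ k) (hj : j ≤ 2*k) : pvGen j ≤ M k := by
  induction j using Nat.strong_induction_on with
  | _ j ih =>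
    match j, hj with
    | 0, _ => rw [pvGen_zero]; exact le_trans (by omega) (one_le_M k)
    | 1, _ => rw [pvGen_one]; exact one_le_M k
    | j+2, hj =>
      by_cases h2 : (j+2) % 2 = 0
      · obtain ⟨i, hi⟩ : ∃ i, j + 2 = 2*i := ⟨(j+2)/2, by omega⟩
        rw [hi, pvGen_even i (by omega)]
        exact ih i (by omega) (by omega)
      · obtain ⟨i, hi⟩ : ∃ i, j + 2 = 2*i+1 := ⟨(j+2)/2, by omega⟩
        rw [hi]
        exact pvGen_odd_le_M i k (by omega) (by omega)

lemma pvGen_le_gmax (j N : Nat) (h : j ≤ N) : pvGen j ≤ gmax N := by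
  induction N with
  | zero => interval_cases j; simp [gmax, pvGen_zero]
  | succ N ih =>
    rcases Nat.lt_succ_iff_lt_or_eq.mp (Nat.lt_succ_of_le h) with h' | rfl
    · exact le_trans (ih (by omega)) (le_max_left _ _)
    · exact le_max_right _ _

lemma gmax_le (N : Nat) (c : Int) (h : ∀ j, j ≤ N → pvGen j ≤ c) : gmax N ≤ c := by
  induction N with
  | zero =>
    have h0 := h 0 (by omega)
    rw [pvGen_zero] at h0
    simpa [gmax] using h0
  | succ N ih =>
    exact max_le (ih (fun j hj => h j (by omega))) (h (N+1) le_rfl)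

lemma M_le_gmax (k N : Nat) (hN : 1 ≤ N) (hk : 2*k ≤ N+1) : M k ≤ gmax N := by
  induction k with
  | zero =>
    have h1 := pvGen_le_gmax 1 N hN
    rw [pvGen_one] at h1
    simpa [M] using h1
  | succ k ih =>
    match k, ih with
    | 0, _ =>
      have h1 := pvGen_le_gmax 1 N hN
      rw [pvGen_one] at h1
      simpa [M] using h1
    | k+1, ih =>
      rw [M_succ (k+1) (by omega)]
      exact max_le (ih (by omega)) (pvGen_le_gmax _ N (by omega))

lemma M_eq_gmax (k N : Nat) (hN : 1 ≤ N) (hk1 : 1 ≤ k) (h1 : N ≤ 2*k) (h2 : 2*k ≤ N+1) :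
    M k = gmax N :=
  le_antisymm (M_le_gmax k N hN h2)
    (gmax_le N (M k) (fun j hj => pvGen_le_M j k hk1 (by omega)))

-- list indexing helpers
lemma getD_set_eq (l : List Int) (i : Nat) (v : Int) (h : i < l.length) :
    (l.set i v).getD i 0 = v := by
  simp [List.getD, h]

lemma getD_set_ne (l : List Int) (i j : Nat) (v : Int) (h : j ≠ i) :
    (l.set i v).getD j 0 = l.getD j 0 := by
  simp [List.getD, List.getElem?_set_ne (by omega : i ≠ j)]

-- the main loop invariant for A
lemma aloop_eq (N : Nat) (hN : 1 ≤ N) :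
    ∀ d k (nums : List Int), d + k = N/2 + 1 → 1 ≤ k →
      (N % 2 = 0 → k ≤ N/2) →
      nums.length = N + 1 →
      (∀ j, j < 2*k → j ≤ N → nums.getD j 0 = pvGen j) →
      pvALoop (N/2) (decide (N % 2 = 0)) k nums (M k)
        = (if N % 2 = 0 then M (N/2) else M (N/2 + 1)) := by
  intro d
  induction d with
  | zero =>
    intro k nums hdk hk hkev hlen hinv
    have hk' : k = N/2 + 1 := by omega
    have hodd : ¬ N % 2 = 0 := fun h => by omega
    rw [pvALoop]
    simp [hk', hodd]
  | succ d ih =>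
    intro k nums hdk hk hkev hlen hinv
    have hkH : k ≤ N/2 := by omega
    have hN2 : 2 ≤ N := by omega
    rw [pvALoop]
    have hnotstop : ¬ (N/2 + 1 ≤ k) := by omega
    simp only [hnotstop, dite_false]
    have hkN : k ≤ N := by omega
    have h2kN : 2*k ≤ N := by omega
    have hgk : nums.getD k 0 = pvGen k := hinv k (by omega) hkN
    set nums1 := nums.set (2*k) (nums.getD k 0) with hnums1
    have hlen1 : nums1.length = N + 1 := by simp [hnums1, hlen]
    have hinv1 : ∀ j, j < 2*k+1 → j ≤ N → nums1.getD j 0 = pvGen j := by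
      intro j hj hjN
      by_cases hje : j = 2*k
      · subst hje
        rw [hnums1, hgk, getD_set_eq nums (2*k) _ (by omega)]
        exact (pvGen_even k hk).symm
      · rw [hnums1, getD_set_ne nums (2*k) j _ hje]
        exact hinv j (by omega) hjN
    by_cases hbr : k = N/2 ∧ N % 2 = 0
    · simp [hbr.1, hbr.2]
    · have hbr' : ¬ (k = N/2 ∧ decide (N % 2 = 0) = true) := by
        simpa using hbr
      simp only [hbr', if_false]
      have hk1N : k + 1 ≤ N := by omega
      have hv1 : nums1.getD k 0 = pvGen k := hinv1 k (by omega) hkN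
      have hv2 : nums1.getD (k+1) 0 = pvGen (k+1) := hinv1 (k+1) (by omega) hk1N
      have hvodd : nums1.getD k 0 + nums1.getD (k+1) 0 = pvGen (2*k+1) := by
        rw [hv1, hv2, pvGen_odd k hk]
      have h2k1N : 2*k+1 ≤ N := by
        rcases Nat.lt_or_ge k (N/2) with h | h
        · omega
        · have hkeq : k = N/2 := by omega
          have : ¬ N % 2 = 0 := fun he => hbr ⟨hkeq, he⟩
          omega
      have hinv2 : ∀ j, j < 2*(k+1) → j ≤ N →
          ((nums1.set (2*k+1) (nums1.getD k 0 + nums1.getD (k+1) 0)).getD j 0) = pvGen j := by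
        intro j hj hjN
        by_cases hje : j = 2*k+1
        · subst hje
          rw [getD_set_eq nums1 (2*k+1) _ (by omega), hvodd]
        · rw [getD_set_ne nums1 (2*k+1) j _ hje]
          exact hinv1 j (by omega) hjN
      have hmax : max (M k) (nums1.getD k 0 + nums1.getD (k+1) 0) = M (k+1) := by
        rw [hvodd, M_succ k hk]
      rw [hmax]
      exact ih (k+1) _ (by omega) (by omega)
        (fun he => by
          have : k ≠ N/2 := fun hke => hbr ⟨hke, he⟩
          omega)
        (by simp [hlen1]) hinv2

-- ===== B-side lemmas: the memo is coherent and pvBF computes pvGen =====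

-- every memo entry records the recurrence value of its (nonnegative) key
def pvInv (memo : Std.HashMap Int Int) : Prop :=
  ∀ (k v : Int), memo[k]? = some v → 0 ≤ k ∧ v = pvGen k.toNat

lemma pvInv_empty : pvInv (∅ : Std.HashMap Int Int) := by
  intro k v h
  simp [Std.HashMap.getElem?_empty] at h

lemma pvInv_insert (memo : Std.HashMap Int Int) (j : Int) (hj : 0 ≤ j)
    (h : pvInv memo) : pvInv (memo.insert j (pvGen j.toNat)) := by
  intro k v hk
  rw [Std.HashMap.getElem?_insert] at hk
  split_ifs at hk with he
  · rw [beq_iff_eq] at he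
    cases hk
    exact ⟨he ▸ hj, by rw [he]⟩
  · exact h k v hk

lemma pvInv_getD (memo : Std.HashMap Int Int) (j : Int)
    (h : pvInv memo) (hc : memo.contains j = true) : memo.getD j 0 = pvGen j.toNat := by
  rw [Std.HashMap.contains_eq_isSome_getElem?] at hc
  obtain ⟨v, hv⟩ := Option.isSome_iff_exists.mp hc
  rw [Std.HashMap.getD_eq_getD_getElem?, hv, Option.getD_some]
  exact (h j v hv).2

lemma bf_spec : ∀ (fuel : Nat) (j : Int) (memo : Std.HashMap Int Int),
    j.toNat < fuel → 0 ≤ j → pvInv memo →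
    (pvBF fuel j memo).1 = pvGen j.toNat ∧ pvInv (pvBF fuel j memo).2 := by
  intro fuel
  induction fuel with
  | zero => intro j memo hjt; omega
  | succ t ih =>
    intro j memo hjt hj hmem
    rw [pvBF]
    by_cases hlt : j < 2
    · rw [if_pos hlt]
      refine ⟨?_, hmem⟩
      interval_cases j
      · simp [pvGen_zero]
      · simp [pvGen_one]
    · rw [if_neg hlt]
      have hj2 : 2 ≤ j := by omega
      have hfd : PySem.Int.floordiv j 2 = j / 2 :=
        PySem.Int.floordiv_eq_ediv_of_pos (by norm_num)
      have hmd : PySem.Int.mod j 2 = j % 2 :=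
        PySem.Int.mod_eq_emod_of_pos (by norm_num)
      have htn : (PySem.Int.floordiv j 2).toNat = j.toNat / 2 := by rw [hfd]; omega
      have htn1 : (PySem.Int.floordiv j 2 + 1).toNat = j.toNat / 2 + 1 := by rw [hfd]; omega
      by_cases hc : memo.contains j = true
      · rw [if_pos hc]
        exact ⟨pvInv_getD memo j hmem hc, hmem⟩
      · rw [if_neg hc]
        obtain ⟨hv1, hm1⟩ := ih (PySem.Int.floordiv j 2) memo
          (by rw [htn]; omega) (by rw [hfd]; omega) hmem
        by_cases hpar : (PySem.Int.mod j 2 == 0) = true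
        · rw [if_pos hpar]
          have hje : j.toNat % 2 = 0 := by
            rw [hmd, beq_iff_eq] at hpar; omega
          have hgeq : pvGen (j.toNat / 2) = pvGen j.toNat := by
            have h2k : 2 * (j.toNat / 2) = j.toNat := by omega
            conv_rhs => rw [← h2k]
            rw [pvGen_even (j.toNat / 2) (by omega)]
          have hveq : (pvBF t (PySem.Int.floordiv j 2) memo).1 = pvGen j.toNat := by
            rw [hv1, htn, hgeq]
          refine ⟨?_, ?_⟩
          · show ((pvBF t (PySem.Int.floordiv j 2) memo).2.insert j
              (pvBF t (PySem.Int.floordiv j 2) memo).1).getD j 0 = pvGen j.toNat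
            rw [hveq, Std.HashMap.getD_insert_self]
          · show pvInv ((pvBF t (PySem.Int.floordiv j 2) memo).2.insert j
              (pvBF t (PySem.Int.floordiv j 2) memo).1)
            rw [hveq]
            exact pvInv_insert _ j hj hm1
        · rw [if_neg hpar]
          have hje : j.toNat % 2 = 1 := by
            rw [hmd, beq_iff_eq] at hpar
            omega
          obtain ⟨hv2, hm2⟩ := ih (PySem.Int.floordiv j 2 + 1)
            (pvBF t (PySem.Int.floordiv j 2) memo).2
            (by rw [htn1]; omega) (by rw [hfd]; omega) hm1
          have hgeq : pvGen (j.toNat / 2) + pvGen (j.toNat / 2 + 1) = pvGen j.toNat := by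
            have h2k : 2 * (j.toNat / 2) + 1 = j.toNat := by omega
            conv_rhs => rw [← h2k]
            rw [pvGen_odd (j.toNat / 2) (by omega)]
          have hveq : (pvBF t (PySem.Int.floordiv j 2) memo).1
              + (pvBF t (PySem.Int.floordiv j 2 + 1) (pvBF t (PySem.Int.floordiv j 2) memo).2).1
              = pvGen j.toNat := by
            rw [hv1, hv2, htn, htn1, hgeq]
          refine ⟨?_, ?_⟩
          · show ((pvBF t (PySem.Int.floordiv j 2 + 1) (pvBF t (PySem.Int.floordiv j 2) memo).2).2.insert j
              ((pvBF t (PySem.Int.floordiv j 2) memo).1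
                + (pvBF t (PySem.Int.floordiv j 2 + 1) (pvBF t (PySem.Int.floordiv j 2) memo).2).1)).getD j 0
              = pvGen j.toNat
            rw [hveq, Std.HashMap.getD_insert_self]
          · show pvInv ((pvBF t (PySem.Int.floordiv j 2 + 1) (pvBF t (PySem.Int.floordiv j 2) memo).2).2.insert j
              ((pvBF t (PySem.Int.floordiv j 2) memo).1
                + (pvBF t (PySem.Int.floordiv j 2 + 1) (pvBF t (PySem.Int.floordiv j 2) memo).2).1))
            rw [hveq]
            exact pvInv_insert _ j hj hm2

lemma pvBF_val (j : Int) (memo : Std.HashMap Int Int) (hj : 0 ≤ j) (hmem : pvInv memo) :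
    (pvBF (j.toNat + 1) j memo).1 = pvGen j.toNat ∧ pvInv (pvBF (j.toNat + 1) j memo).2 :=
  bf_spec (j.toNat + 1) j memo (by omega) hj hmem

-- the running maximum max(…) keeps over a list of values
def pvMaxOpt : Option Int → List Int → Option Int
  | mo, [] => mo
  | none, x :: t => pvMaxOpt (some x) t
  | some m, x :: t => pvMaxOpt (some (max m x)) t

lemma pvMaxOpt_some (a : Int) (l : List Int) : pvMaxOpt (some a) l = some (l.foldl max a) := by
  induction l generalizing a with
  | nil => simp [pvMaxOpt]
  | cons x t ih => rw [pvMaxOpt, List.foldl_cons, ih]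

-- the fold threading the memo computes the running maximum of the recurrence values
lemma bfold_max (L : List Int) :
    ∀ (memo : Std.HashMap Int Int) (mo : Option Int), (∀ j ∈ L, 0 ≤ j) → pvInv memo →
      (L.foldl (fun acc j =>
          let r := pvBF (j.toNat + 1) j acc.1
          (r.2, some (match acc.2 with | none => r.1 | some m => max m r.1))) (memo, mo)).2
        = pvMaxOpt mo (L.map (fun j => pvGen j.toNat)) := by
  induction L with
  | nil =>
    intro memo mo _ _
    simp [pvMaxOpt]
  | cons x L ih =>
    intro memo mo hpos hmem
    simp only [List.foldl_cons, List.map_cons]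
    obtain ⟨hv, hm⟩ := pvBF_val x memo (hpos x (by simp)) hmem
    rw [ih (pvBF (x.toNat + 1) x memo).2 _ (fun j hj => hpos j (by simp [hj])) hm]
    cases mo with
    | none => rw [hv]; rfl
    | some m => rw [hv]; rfl

-- B computes gmax
lemma foldl_max_eq_gmax (N : Nat) :
    ((List.range N).map (fun k => pvGen (k+1))).foldl max 0 = gmax N := by
  induction N with
  | zero => simp [gmax]
  | succ N ih =>
    rw [List.range_succ, List.map_append, List.foldl_append, ih]
    simp [gmax]

lemma alt_eq_gmax (N : Nat) : getMaximumGenerated_alt (N : Int) = gmax N := by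
  simp only [getMaximumGenerated_alt]
  have hrange : PySem.List.pyRange 0 ((N : Int)+1) 1
      = (List.range (N+1)).map (fun k : Nat => (k : Int)) := by
    rw [PySem.List.pyRange_one]
    have h1 : (((N : Int) + 1) - 0).toNat = N + 1 := by omega
    rw [h1]
    exact List.map_congr_left (fun k _ => by omega)
  rw [hrange]
  rw [bfold_max ((List.range (N+1)).map (fun k : Nat => (k : Int))) ∅ none
    (by
      intro j hj
      simp only [List.mem_map] at hj
      obtain ⟨k, -, rfl⟩ := hj
      omega)
    pvInv_empty]
  rw [List.map_map]
  have hmap : (List.range (N+1)).map ((fun j : Int => pvGen j.toNat) ∘ (fun k : Nat => (k : Int)))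
      = (List.range (N+1)).map pvGen :=
    List.map_congr_left (fun k _ => by simp)
  rw [hmap, List.range_succ_eq_map, List.map_cons]
  rw [pvGen_zero, List.map_map]
  have hcomp : (List.range N).map (pvGen ∘ Nat.succ)
       = (List.range N).map (fun k => pvGen (k+1)) := rfl
  rw [hcomp]
  show (pvMaxOpt none (0 :: (List.range N).map (fun k => pvGen (k+1)))).getD 0 = gmax N
  rw [pvMaxOpt, pvMaxOpt_some, Option.getD_some, foldl_max_eq_gmax]

-- A computes gmax too
lemma a_eq_gmax (N : Nat) (hN : 1 ≤ N) : getMaximumGenerated (N : Int) = gmax N := by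
  unfold getMaximumGenerated
  have hne : ¬ ((N : Int) = 0) := by omega
  simp only [hne, if_false]
  have hfd : (PySem.Int.floordiv (N : Int) 2).toNat = N / 2 := by
    rw [PySem.Int.floordiv_eq_ediv_of_pos (by omega)]
    omega
  have hmd : (PySem.Int.mod (N : Int) 2 == 0) = decide (N % 2 = 0) := by
    rw [PySem.Int.mod_eq_emod_of_pos (by omega)]
    rcases Nat.mod_two_eq_zero_or_one N with h | h
    · have h2 : (N : Int) % 2 = 0 := by omega
      have h3 : N % 2 = 0 := by omega
      simp [h2, h3]
    · have h2 : ¬ ((N : Int) % 2 = 0) := by omega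
      have h3 : ¬ (N % 2 = 0) := by omega
      simp [h2, h3]
  have hlen : ((N : Int) + 1).toNat = N + 1 := by omega
  rw [hfd, hmd, hlen]
  have hres := aloop_eq N hN (N/2) 1
    ((List.replicate (N+1) (0:Int)).set 1 1) (by omega) le_rfl
    (by intro h; omega)
    (by simp)
    (by
      intro j hj hjN
      interval_cases j
      · rw [getD_set_ne _ 1 0 _ (by omega), pvGen_zero]
        simp [List.getD]
      · rw [getD_set_eq _ 1 _ (by simp; omega)]
        exact pvGen_one.symm)
  have htgt : (if N % 2 = 0 then M (N/2) else M (N/2 + 1)) = gmax N := by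
    by_cases he : N % 2 = 0
    · simp only [he, if_true]
      exact M_eq_gmax (N/2) N hN (by omega) (by omega) (by omega)
    · simp only [he, if_false]
      exact M_eq_gmax (N/2 + 1) N hN (by omega) (by omega) (by omega)
  exact hres.trans htgt

-- ===== VERDICT (by name: the statement is the Claim_ definition above) =====
theorem getMaximumGenerated_spec : Claim_equal_getMaximumGenerated := by
  intro n _ hpre
  show getMaximumGenerated n = getMaximumGenerated_alt n
  obtain ⟨N, rfl⟩ : ∃ N : Nat, n = (N : Int) := ⟨n.toNat, (Int.toNat_of_nonneg hpre).symm⟩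
  rcases Nat.eq_zero_or_pos N with rfl | hpos
  · rw [alt_eq_gmax 0]
    unfold getMaximumGenerated
    norm_num [gmax]
  · rw [a_eq_gmax N hpos, alt_eq_gmax N]
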